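-- pv_equiv track=rewrite | github.com/rimirome/rimidi-kg | tools/auto_schema_diff.py | extract_node_entries
-- ===== SOURCE A (Python) =====
-- from typing import Dict, List
--
-- def extract_node_entries(text: str) -> Dict[str, str]:
--     blocks: dict[str, str] = {}
--     current_name: str | None = None
--     current_lines: list[str] = []
--     for line in text.splitlines():
--         stripped = line.strip()
--         if stripped.startswith("- name:"):
--             if current_name is not None:
--                 blocks[current_name] = "\n".join(current_lines).strip()
--                 current_lines = []
--             current_name = stripped.split(":", 1)[1].strip()
--         elif current_name is not None:
--             if stripped.startswith("- name:"):
--                 continue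
--             if stripped.startswith("- type:"):
--                 continue
--             current_lines.append(line)
--     if current_name is not None:
--         blocks[current_name] = "\n".join(current_lines).strip()
--     return blocks
-- ===== SOURCE B (Python) =====
-- def extract_node_entries(text):
--     # Phase 1: partition lines into (name, raw-body-lines) segments.
--     segments = []
--     for line in text.splitlines():
--         stripped = line.strip()
--         if stripped.startswith("- name:"):
--             segments.append((stripped.split(":", 1)[1].strip(), []))
--         elif segments:
--             segments[-1][1].append(line)
--     # Phase 2: per segment, drop '- type:' lines, join and strip.
--     out = {}
--     for name, body in segments:
--         out[name] = "\n".join(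
--             ln for ln in body if not ln.strip().startswith("- type:")
--         ).strip()
--     return out
-- ===== Notes on version B (the rewrite author's own statement) =====
-- stated objective: alternative
-- what changed: Replaces A's single-pass state machine (current_name/current_lines with in-loop filtering and flush-on-header) by a two-phase segment-then-map decomposition: first partition the raw lines into (name, body-lines) segments at '- name:' headers, then build the dict by filtering '- type:' lines, joining and stripping each segment's body.
import Mathlib
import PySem

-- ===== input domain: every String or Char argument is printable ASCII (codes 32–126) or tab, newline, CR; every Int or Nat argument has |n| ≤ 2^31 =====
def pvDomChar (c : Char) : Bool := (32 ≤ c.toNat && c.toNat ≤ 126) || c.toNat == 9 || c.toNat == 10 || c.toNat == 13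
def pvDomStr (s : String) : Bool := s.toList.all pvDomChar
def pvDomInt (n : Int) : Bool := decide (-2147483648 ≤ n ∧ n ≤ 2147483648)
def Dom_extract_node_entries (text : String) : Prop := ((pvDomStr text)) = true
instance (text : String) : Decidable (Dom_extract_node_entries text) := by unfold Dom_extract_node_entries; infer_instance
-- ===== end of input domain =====

-- B re-decomposes A's single-pass state machine into segment-then-map (partition lines at
-- '- name:' headers, then build each block); same return value, 'alternative' objective.

-- shared helper: the name extracted from a stripped '- name:' header line,
-- i.e. stripped.split(":", 1)[1].strip().  The [1] index always exists here because the
-- caller only reaches this when stripped starts with "- name:" (so ":" occurs); the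
-- .getD fallbacks are therefore never taken.
def pvName (stripped : String) : String :=
  PySem.Str.strip (((PySem.Str.splitMax? stripped ":" 1).getD []).getD 1 "")

-- ===== PORT A =====
-- loop body of A: state = (blocks, current_name, current_lines)
def pvAStep (st : PySem.Dict String String × Option String × List String) (line : String) :
    PySem.Dict String String × Option String × List String :=
  let stripped := PySem.Str.strip line
  if PySem.Str.startswith stripped "- name:" then
    match st with
    | (blocks, some n, curLines) =>
        (blocks.insert n (PySem.Str.strip (PySem.Str.join "\n" curLines)), some (pvName stripped), [])
    | (blocks, none, _) => (blocks, some (pvName stripped), [])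
  else
    match st with
    | (blocks, some n, curLines) =>
        if PySem.Str.startswith stripped "- type:" then (blocks, some n, curLines)
        else (blocks, some n, curLines ++ [line])
    | (blocks, none, curLines) => (blocks, none, curLines)

-- A's trailing flush: 'if current_name is not None: blocks[current_name] = …'
def pvAFinish (st : PySem.Dict String String × Option String × List String) :
    List (String × String) :=
  match st with
  | (blocks, some n, curLines) =>
      (blocks.insert n (PySem.Str.strip (PySem.Str.join "\n" curLines))).items
  | (blocks, none, _) => blocks.items

def extract_node_entries (text : String) : List (String × String) :=
  pvAFinish ((PySem.Str.splitlines text).foldl pvAStep (PySem.Dict.empty, none, []))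

-- ===== PORT B =====
-- phase-1 loop body of B: start a new (name, []) segment at a header line,
-- otherwise append the raw line to the last segment (if any)
def pvBStep (segs : List (String × List String)) (line : String) : List (String × List String) :=
  let stripped := PySem.Str.strip line
  if PySem.Str.startswith stripped "- name:" then
    segs ++ [(pvName stripped, [])]
  else
    match segs.getLast? with
    | some (n, body) => segs.dropLast ++ [(n, body ++ [line])]
    | none => segs

-- phase-2 per-segment finisher: drop '- type:' lines, join with '\n', strip
def pvFinish (body : List String) : String :=
  PySem.Str.strip (PySem.Str.join "\n"
    (body.filter (fun ln => !PySem.Str.startswith (PySem.Str.strip ln) "- type:")))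

-- phase-2 loop of B: out[name] = finished block, in segment order
def pvDictOf (segs : List (String × List String)) : PySem.Dict String String :=
  segs.foldl (fun out p => out.insert p.1 (pvFinish p.2)) PySem.Dict.empty

def extract_node_entries_alt (text : String) : List (String × String) :=
  (pvDictOf ((PySem.Str.splitlines text).foldl pvBStep [])).items

-- ===== PRECONDITION & SPEC =====
def Spec_extract_node_entries (text : String) (out : List (String × String)) : Prop := out = extract_node_entries_alt text
instance (text : String) (out : List (String × String)) : Decidable (Spec_extract_node_entries text out) := by unfold Spec_extract_node_entries; infer_instance

-- ===== CLAIM (what is proved, stated in full; the proofs are below) =====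
def Claim_equal_extract_node_entries : Prop := ∀ (text : String), Dom_extract_node_entries text → Spec_extract_node_entries text (extract_node_entries text)

-- ===== LEMMAS AND PROOFS =====

def pvKeep (body : List String) : List String :=
  body.filter (fun ln => !PySem.Str.startswith (PySem.Str.strip ln) "- type:")

-- invariant relating B's segment list to A's state after the same lines
def pvRel (segs : List (String × List String))
    (st : PySem.Dict String String × Option String × List String) : Prop :=
  (st.2.1 = none → segs = [] ∧ st.1 = PySem.Dict.empty ∧ st.2.2 = []) ∧
  (∀ n, st.2.1 = some n →
    ∃ pre body, segs = pre ++ [(n, body)] ∧ st.2.2 = pvKeep body ∧ st.1 = pvDictOf pre)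

theorem pvDictOf_append (pre : List (String × List String)) (x : String × List String) :
    pvDictOf (pre ++ [x]) = (pvDictOf pre).insert x.1 (pvFinish x.2) := by
  unfold pvDictOf
  rw [List.foldl_append, List.foldl_cons, List.foldl_nil]

theorem pvFinish_eq (body : List String) :
    pvFinish body = PySem.Str.strip (PySem.Str.join "\n" (pvKeep body)) := rfl

theorem pvKeep_append_keep (body : List String) (line : String)
    (h : PySem.Str.startswith (PySem.Str.strip line) "- type:" = false) :
    pvKeep (body ++ [line]) = pvKeep body ++ [line] := by
  unfold pvKeep
  simp at h
  rw [List.filter_append]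
  simp [h]

theorem pvKeep_append_drop (body : List String) (line : String)
    (h : PySem.Str.startswith (PySem.Str.strip line) "- type:" = true) :
    pvKeep (body ++ [line]) = pvKeep body := by
  unfold pvKeep
  simp at h
  rw [List.filter_append]
  simp [h]

-- computation lemmas for the two step functions
theorem pvAStep_name (blocks : PySem.Dict String String) (curLines : List String)
    (n : String) (line : String)
    (h : PySem.Str.startswith (PySem.Str.strip line) "- name:" = true) :
    pvAStep (blocks, some n, curLines) line =
      (blocks.insert n (PySem.Str.strip (PySem.Str.join "\n" curLines)),
       some (pvName (PySem.Str.strip line)), []) := by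
  simp only [pvAStep, h, if_true]

theorem pvAStep_name_none (blocks : PySem.Dict String String) (curLines : List String)
    (line : String)
    (h : PySem.Str.startswith (PySem.Str.strip line) "- name:" = true) :
    pvAStep (blocks, none, curLines) line =
      (blocks, some (pvName (PySem.Str.strip line)), []) := by
  simp only [pvAStep, h, if_true]

theorem pvAStep_other_none (blocks : PySem.Dict String String) (curLines : List String)
    (line : String)
    (h : PySem.Str.startswith (PySem.Str.strip line) "- name:" = false) :
    pvAStep (blocks, none, curLines) line = (blocks, none, curLines) := by
  simp only [pvAStep, h, Bool.false_eq_true, if_false]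

theorem pvAStep_other_type (blocks : PySem.Dict String String) (curLines : List String)
    (n : String) (line : String)
    (h : PySem.Str.startswith (PySem.Str.strip line) "- name:" = false)
    (ht : PySem.Str.startswith (PySem.Str.strip line) "- type:" = true) :
    pvAStep (blocks, some n, curLines) line = (blocks, some n, curLines) := by
  simp only [pvAStep, h, ht, Bool.false_eq_true, if_false, if_true]

theorem pvAStep_other_keep (blocks : PySem.Dict String String) (curLines : List String)
    (n : String) (line : String)
    (h : PySem.Str.startswith (PySem.Str.strip line) "- name:" = false)
    (ht : PySem.Str.startswith (PySem.Str.strip line) "- type:" = false) :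
    pvAStep (blocks, some n, curLines) line = (blocks, some n, curLines ++ [line]) := by
  simp only [pvAStep, h, ht, Bool.false_eq_true, if_false]

theorem pvBStep_name (segs : List (String × List String)) (line : String)
    (h : PySem.Str.startswith (PySem.Str.strip line) "- name:" = true) :
    pvBStep segs line = segs ++ [(pvName (PySem.Str.strip line), [])] := by
  simp only [pvBStep, h, if_true]

theorem pvBStep_other_nil (line : String)
    (h : PySem.Str.startswith (PySem.Str.strip line) "- name:" = false) :
    pvBStep [] line = [] := by
  simp only [pvBStep, h, Bool.false_eq_true, if_false, List.getLast?_nil]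

theorem pvBStep_other_last (pre : List (String × List String)) (n : String)
    (body : List String) (line : String)
    (h : PySem.Str.startswith (PySem.Str.strip line) "- name:" = false) :
    pvBStep (pre ++ [(n, body)]) line = pre ++ [(n, body ++ [line])] := by
  simp only [pvBStep, h, Bool.false_eq_true, if_false, List.getLast?_append,
    List.getLast?_singleton, Option.some_or, List.dropLast_concat]

theorem pvKeep_nil : pvKeep [] = [] := rfl

theorem pvDictOf_nil : pvDictOf [] = PySem.Dict.empty := rfl

-- introduction forms of the invariant for the two shapes of A's state
theorem pvRel_mk_none : pvRel [] (PySem.Dict.empty, none, []) := by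
  constructor
  · intro _
    exact ⟨rfl, rfl, rfl⟩
  · intro n hn
    cases hn

theorem pvRel_mk_some (pre : List (String × List String)) (body : List String) (n : String)
    (blocks : PySem.Dict String String) (curLines : List String)
    (hc : curLines = pvKeep body) (hb : blocks = pvDictOf pre) :
    pvRel (pre ++ [(n, body)]) (blocks, some n, curLines) := by
  constructor
  · intro hn
    cases hn
  · intro m hm
    obtain rfl : n = m := by injection hm
    exact ⟨pre, body, rfl, hc, hb⟩

theorem pvRel_step (segs : List (String × List String))
    (st : PySem.Dict String String × Option String × List String) (line : String)
    (h : pvRel segs st) : pvRel (pvBStep segs line) (pvAStep st line) := by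
  obtain ⟨blocks, cur, curLines⟩ := st
  obtain ⟨h0, h1⟩ := h
  rcases Bool.eq_false_or_eq_true
      (PySem.Str.startswith (PySem.Str.strip line) "- name:") with hname | hname
  · -- a '- name:' header line
    rw [pvBStep_name segs line hname]
    cases cur with
    | none =>
        obtain ⟨hs, hb, hc⟩ := h0 rfl
        subst hs hb hc
        rw [pvAStep_name_none _ _ _ hname]
        exact pvRel_mk_some [] [] _ _ _ pvKeep_nil.symm pvDictOf_nil.symm
    | some n =>
        obtain ⟨pre, body, hs, hc, hb⟩ := h1 n rfl
        subst hs hc hb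
        rw [pvAStep_name _ _ _ _ hname]
        refine pvRel_mk_some (pre ++ [(n, body)]) [] _ _ _ pvKeep_nil.symm ?_
        rw [pvDictOf_append, pvFinish_eq]

  · -- not a header line
    cases cur with
    | none =>
        obtain ⟨hs, hb, hc⟩ := h0 rfl
        subst hs hb hc
        rw [pvBStep_other_nil line hname, pvAStep_other_none _ _ _ hname]
        exact pvRel_mk_none
    | some n =>
        obtain ⟨pre, body, hs, hc, hb⟩ := h1 n rfl
        subst hs hc hb
        rw [pvBStep_other_last pre n body line hname]
        rcases Bool.eq_false_or_eq_true
            (PySem.Str.startswith (PySem.Str.strip line) "- type:") with htype | htype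
        · rw [pvAStep_other_type _ _ _ _ hname htype]
          exact pvRel_mk_some pre (body ++ [line]) n _ _
            (pvKeep_append_drop body line htype).symm rfl
        · rw [pvAStep_other_keep _ _ _ _ hname htype]
          exact pvRel_mk_some pre (body ++ [line]) n _ _
            (pvKeep_append_keep body line htype).symm rfl
theorem pvRel_foldl (lines : List String) (segs : List (String × List String))
    (st : PySem.Dict String String × Option String × List String)
    (h : pvRel segs st) : pvRel (lines.foldl pvBStep segs) (lines.foldl pvAStep st) := by
  induction lines generalizing segs st with
  | nil => exact h
  | cons l ls ih =>
      rw [List.foldl_cons, List.foldl_cons]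
      exact ih _ _ (pvRel_step _ _ _ h)

theorem pvRel_final (segs : List (String × List String))
    (st : PySem.Dict String String × Option String × List String)
    (h : pvRel segs st) : pvAFinish st = (pvDictOf segs).items := by
  obtain ⟨blocks, cur, curLines⟩ := st
  obtain ⟨h0, h1⟩ := h
  cases cur with
  | none =>
      obtain ⟨hs, hb, _⟩ := h0 rfl
      subst hs hb
      rfl
  | some n =>
      obtain ⟨pre, body, hs, hc, hb⟩ := h1 n rfl
      subst hs hc hb
      simp only [pvAFinish]
      rw [pvDictOf_append, pvFinish_eq]

-- ===== VERDICT (by name: the statement is the Claim_ definition above) =====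
theorem extract_node_entries_spec : Claim_equal_extract_node_entries := by
  intro text _
  show extract_node_entries text = extract_node_entries_alt text
  unfold extract_node_entries extract_node_entries_alt
  exact pvRel_final _ _ (pvRel_foldl (PySem.Str.splitlines text) [] (PySem.Dict.empty, none, [])
    pvRel_mk_none)
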